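-- pv_equiv track=rewrite | github.com/SarasotaDevs/FinFindr | index.py | findMinimumShifts
-- ===== SOURCE A (Python) =====
-- def findMinimumShifts(mat):
--     rows = len(mat)
--     cols = len(mat[0])
--
--     # To store the minimum shifts needed to fill each column with `1`s
--     min_shifts_needed = [float('inf')] * cols
--
--     # Check all possible shifts for each row
--     for row in range(rows):
--         for shift in range(cols):
--             for col in range(cols):
--                 effective_index = (col - shift + cols) % cols
--                 if mat[row][effective_index] == 1:
--                     # Update the minimum shifts needed to bring a `1` into this column
--                     min_shifts_needed[col] = min(min_shifts_needed[col], shift)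
--
--     # Now calculate the minimum shifts required to make at least one column fully `1`s
--     total_min_shifts = float('inf')
--
--     for col in range(cols):
--         current_shifts = 0
--         column_possible = True
--
--         for row in range(rows):
--             if mat[row][col] == 0 and min_shifts_needed[col] == float('inf'):
--                 column_possible = False
--                 break
--             if mat[row][col] == 1:
--                 continue  # No shift needed if there's already a `1` in this column
--             current_shifts += min_shifts_needed[col]
--
--         if column_possible:
--             total_min_shifts = min(total_min_shifts, current_shifts)
--
--     # If we found a valid solution, return the minimum shifts required, else return -1
--     return total_min_shifts if total_min_shifts != float('inf') else -1
-- ===== SOURCE B (Python) =====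
-- def findMinimumShifts(mat):
--     cols = len(mat[0])
--     # which column positions hold a 1 in any row (A pools all rows together)
--     ones = [False] * cols
--     for row in mat:
--         for j in range(cols):
--             if row[j] == 1:
--                 ones[j] = True
--     # rightmost position holding a 1, or -1 if none
--     last = -1
--     for j in range(cols):
--         if ones[j]:
--             last = j
--     if last == -1:
--         return -1
--     last -= cols  # wrap the rightmost 1 around for the cyclic distance
--     best = None
--     for j in range(cols):
--         if ones[j]:
--             last = j
--         shift = j - last  # cyclic distance to the nearest 1 at or left of j
--         cost = shift * sum(1 for row in mat if row[j] != 1)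
--         if best is None or cost < best:
--             best = cost
--     return best
-- ===== Notes on version B (the rewrite author's own statement) =====
-- stated objective: faster
-- what changed: A simulates every shift of every row (a triple rows x cols x cols loop) and then re-walks each column; B scans the matrix once for positions that hold a 1, gets each column's minimal shift as the cyclic distance to the nearest such position at or left of it via a single running-last scan, and multiplies by the count of non-1 entries in the column.
import Mathlib
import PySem

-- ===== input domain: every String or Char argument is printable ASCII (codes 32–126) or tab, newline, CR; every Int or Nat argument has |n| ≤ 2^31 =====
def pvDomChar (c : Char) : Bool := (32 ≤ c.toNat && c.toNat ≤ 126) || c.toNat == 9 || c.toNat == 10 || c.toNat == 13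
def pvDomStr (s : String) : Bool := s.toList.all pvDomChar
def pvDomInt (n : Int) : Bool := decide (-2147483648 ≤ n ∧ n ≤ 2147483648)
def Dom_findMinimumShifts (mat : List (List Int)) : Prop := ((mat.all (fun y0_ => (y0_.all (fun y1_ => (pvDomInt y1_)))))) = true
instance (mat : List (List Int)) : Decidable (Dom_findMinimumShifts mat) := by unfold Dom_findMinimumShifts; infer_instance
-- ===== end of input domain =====

-- B replaces A's triple rows×cols×cols shift simulation by one linear scan for 1-positions
-- plus a running-last cyclic-distance pass (objective: faster, O(rows·cols) vs O(rows·cols²)).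

-- ===== PORT A =====
-- Python's min(min_shifts_needed[col], shift) where `none` models float('inf')
def omin : Option Int → Nat → Option Int
  | none, s => some (s : Int)
  | some x, s => some (min x (s : Int))

-- the inner `for row in range(rows)` loop of A's second phase, with its early `break`:
-- `none` = column_possible was set False; `some cur` = loop finished with current_shifts = cur,
-- where `cur = none` models the float value inf that current_shifts takes after adding inf.
def fmsLoop2 (mat : List (List Int)) (msc : Option Int) (col : Nat) :
    List Nat → Option Int → Option (Option Int)
  | [], cur => some cur
  | r :: rs, cur =>
    if PySem.List.pyGetD (PySem.List.pyGetD mat (r : Int) []) (col : Int) 0 = 0 ∧ msc = none then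
      none
    else if PySem.List.pyGetD (PySem.List.pyGetD mat (r : Int) []) (col : Int) 0 = 1 then
      fmsLoop2 mat msc col rs cur
    else
      fmsLoop2 mat msc col rs
        (match cur, msc with
         | some t, some m => some (t + m)
         | _, _ => none)

def findMinimumShifts (mat : List (List Int)) : Int :=
  let rows := mat.length
  let cols := ((PySem.List.pyGet? mat 0).getD []).length
  -- min_shifts_needed : `none` models float('inf')
  let ms : List (Option Int) :=
    (List.range rows).foldl (fun ms (row : Nat) =>
      (List.range cols).foldl (fun ms (shift : Nat) =>
        (List.range cols).foldl (fun ms (col : Nat) =>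
          if PySem.List.pyGetD (PySem.List.pyGetD mat (row : Int) [])
              (PySem.Int.mod ((col : Int) - (shift : Int) + (cols : Int)) (cols : Int)) 0 = 1 then
            ms.set col (omin (ms.getD col none) shift)
          else ms) ms) ms) (List.replicate cols none)
  -- total_min_shifts : `none` models float('inf')
  let total : Option Int :=
    (List.range cols).foldl (fun total col =>
      match fmsLoop2 mat (ms.getD col none) col (List.range rows) (some 0) with
      | none => total
      | some cur =>
        match total, cur with
        | none, cur => cur
        | some t, none => some t
        | some t, some cu => some (min t cu)) none
  match total with
  | none => -1
  | some t => t

-- ===== PORT B =====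
def findMinimumShifts_alt (mat : List (List Int)) : Int :=
  let cols := ((PySem.List.pyGet? mat 0).getD []).length
  let ones : List Bool :=
    mat.foldl (fun ones row =>
      (List.range cols).foldl (fun ones (j : Nat) =>
        if PySem.List.pyGetD row (j : Int) 0 = 1 then ones.set j true else ones) ones)
      (List.replicate cols false)
  let last : Int :=
    (List.range cols).foldl (fun last j => if ones.getD j false then (j : Int) else last) (-1)
  if last = -1 then -1
  else
    let res : Int × Option Int :=
      (List.range cols).foldl (fun p j =>
        let lst := if ones.getD j false then (j : Int) else p.1
        let shift := (j : Int) - lst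
        let cost := shift *
          (mat.foldl (fun acc row =>
            if PySem.List.pyGetD row (j : Int) 0 = 1 then acc else acc + 1) 0)
        (lst, some (match p.2 with
          | none => cost
          | some b => if cost < b then cost else b))) (last - (cols : Int), none)
    res.2.getD 0

-- ===== PRECONDITION & SPEC =====
-- Pre_ excludes exactly the inputs on which the Python A raises IndexError:
-- the empty matrix (mat[0]) and matrices with a row shorter than the first row.
def Pre_findMinimumShifts (mat : List (List Int)) : Prop :=
  mat ≠ [] ∧ ∀ row ∈ mat, (mat.headD []).length ≤ row.length
instance (mat : List (List Int)) : Decidable (Pre_findMinimumShifts mat) := by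
  unfold Pre_findMinimumShifts; infer_instance

def pvWitness_findMinimumShifts : List (List Int) := [[0, 1], [1, 0]]

def Spec_findMinimumShifts (mat : List (List Int)) (out : Int) : Prop := out = findMinimumShifts_alt mat
instance (mat : List (List Int)) (out : Int) : Decidable (Spec_findMinimumShifts mat out) := by unfold Spec_findMinimumShifts; infer_instance

-- ===== CLAIM (what is proved, stated in full; the proofs are below) =====
def Claim_equal_findMinimumShifts : Prop := ∀ (mat : List (List Int)), Dom_findMinimumShifts mat → Pre_findMinimumShifts mat → Spec_findMinimumShifts mat (findMinimumShifts mat)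

-- ===== LEMMAS AND PROOFS =====

-- whether some row of `mat` holds a 1 at column position j
def oneAt (mat : List (List Int)) (j : Nat) : Bool :=
  mat.any (fun row => decide (PySem.List.pyGetD row (j : Int) 0 = 1))

-- how many rows do NOT hold a 1 at column position j
def cntP (mat : List (List Int)) (j : Nat) : Int :=
  (mat.countP (fun row => !decide (PySem.List.pyGetD row (j : Int) 0 = 1)) : Int)

-- the value of Python's (col - s + cols) % cols for 0 ≤ s, col < cols
def ePos (c col s : Nat) : Nat := if s ≤ col then col - s else col + c - s

-- B's running-last scan over the first n column positions
def lastVal (mat : List (List Int)) (init : Int) (n : Nat) : Int :=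
  (List.range n).foldl (fun last j => if oneAt mat j then (j : Int) else last) init

-- canonical running-minimum step shared by both final loops
def stepM (f : Nat → Int) (b : Option Int) (j : Nat) : Option Int :=
  some (match b with | none => f j | some x => min x (f j))

-- B's cost of column j (init = wrapped rightmost 1-position)
def costB (mat : List (List Int)) (init : Int) (j : Nat) : Int :=
  ((j : Int) - lastVal mat init (j + 1)) * cntP mat j

lemma epos_mod (c col s : Nat) (hcol : col < c) (hs : s < c) :
    PySem.Int.mod ((col : Int) - (s : Int) + (c : Int)) (c : Int) = ((ePos c col s : Nat) : Int) := by
  have hc : (0 : Int) < (c : Int) := by exact_mod_cast Nat.zero_lt_of_lt hs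
  rw [PySem.Int.mod_eq_emod_of_pos hc]
  unfold ePos
  split
  · rename_i h
    have h1 : ((col : Int) - (s : Int) + (c : Int)) = ((col - s : Nat) : Int) + (c : Int) * 1 := by
      push_cast [Nat.cast_sub h]; ring
    rw [h1, Int.add_mul_emod_self_left, Int.emod_eq_of_lt (by positivity) (by exact_mod_cast Nat.lt_of_le_of_lt (Nat.sub_le _ _) hcol)]
  · rename_i h
    have h1 : ((col : Int) - (s : Int) + (c : Int)) = ((col + c - s : Nat) : Int) := by
      push_cast [Nat.cast_sub (by omega : s ≤ col + c)]; ring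
    rw [h1, Int.emod_eq_of_lt (by positivity) (by exact_mod_cast (by omega : col + c - s < c))]

lemma epos_lt (c col s : Nat) (hcol : col < c) (hs : s < c) : ePos c col s < c := by
  unfold ePos; split <;> omega

lemma getD_set' {α : Type} (l : List α) (i j : Nat) (a d : α) :
    (l.set i a).getD j d = if i = j ∧ i < l.length then a else l.getD j d := by
  by_cases h : i = j
  · subst h
    by_cases hl : i < l.length
    · simp [List.getD_eq_getElem?_getD, hl]
    · simp [List.getD_eq_getElem?_getD, hl]
  · simp [List.getD_eq_getElem?_getD, h]

-- generic: a fold of conditional set-at-index updates, read back pointwise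
lemma getD_foldl_setIf {α : Type} (d : α) (P : Nat → Prop) [DecidablePred P] (g : Nat → α → α) :
    ∀ (l : List Nat) (ms : List α) (k : Nat), l.Nodup →
      ((l.foldl (fun ms j => if P j then ms.set j (g j (ms.getD j d)) else ms) ms).getD k d)
        = if k ∈ l ∧ k < ms.length ∧ P k then g k (ms.getD k d) else ms.getD k d := by
  intro l
  induction l with
  | nil => intro ms k _; simp
  | cons j l ih =>
    intro ms k hnd
    have hj : j ∉ l := (List.nodup_cons.mp hnd).1
    have hnd' : l.Nodup := (List.nodup_cons.mp hnd).2
    simp only [List.foldl_cons]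
    by_cases hPj : P j
    · rw [if_pos hPj, ih _ _ hnd', List.length_set]
      by_cases hkj : k = j
      · subst hkj
        rw [if_neg (by simp [hj])]
        by_cases hlen : k < ms.length
        · rw [getD_set', if_pos ⟨rfl, hlen⟩]
          simp [hlen, hPj]
        · rw [getD_set', if_neg (fun h => hlen h.2)]
          simp [hlen]
      · have hset : (ms.set j (g j (ms.getD j d))).getD k d = ms.getD k d := by
          rw [getD_set', if_neg (fun h => hkj h.1.symm)]
        rw [hset]
        simp [List.mem_cons, hkj]
    · rw [if_neg hPj, ih _ _ hnd']
      by_cases hkj : k = j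
      · subst hkj; simp [hPj]
      · simp [List.mem_cons, hkj]

lemma length_foldl_setIf {α : Type} (d : α) (P : Nat → Prop) [DecidablePred P] (g : Nat → α → α) :
    ∀ (l : List Nat) (ms : List α),
      (l.foldl (fun ms j => if P j then ms.set j (g j (ms.getD j d)) else ms) ms).length
        = ms.length := by
  intro l
  induction l with
  | nil => intro ms; simp
  | cons j l ih =>
    intro ms
    simp only [List.foldl_cons]
    by_cases hPj : P j
    · rw [if_pos hPj, ih, List.length_set]
    · rw [if_neg hPj, ih]

-- generic: fold over a row index range = fold over the list itself
lemma foldl_range_getD {α β : Type} (f : β → α → β) (d : α) :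
    ∀ (l : List α) (a : β),
      (List.range l.length).foldl (fun acc r => f acc (l.getD r d)) a = l.foldl f a := by
  intro l
  induction l with
  | nil => intro a; simp
  | cons x l ih =>
    intro a
    simp only [List.length_cons, List.range_succ_eq_map, List.foldl_cons, List.foldl_map,
      List.getD_cons_zero, List.getD_cons_succ]
    exact ih (f a x)

lemma any_range_getD {α : Type} (p : α → Bool) (d : α) :
    ∀ (l : List α),
      ((List.range l.length).any (fun r => p (l.getD r d))) = l.any p := by
  intro l
  induction l with
  | nil => simp
  | cons x l ih =>
    simp only [List.length_cons, List.range_succ_eq_map, List.any_cons, List.any_map,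
      List.getD_cons_zero]
    rw [← ih]
    rfl

-- a running-min fold over an ascending list keeps only the first hit
lemma omin_omin (v : Option Int) (a b : Nat) : omin (omin v a) b = omin v (min a b) := by
  cases v with
  | none =>
    show some (min (a : Int) (b : Int)) = some ((min a b : Nat) : Int)
    simp [Nat.cast_min]
  | some x =>
    show some (min (min x (a : Int)) (b : Int)) = some (min x ((min a b : Nat) : Int))
    simp [Nat.cast_min, min_assoc]

lemma omin_right_absorb (v : Option Int) (a b : Nat) (h : a ≤ b) : omin (omin v a) b = omin v a := by
  have h' : (a : Int) ≤ (b : Int) := by exact_mod_cast h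
  cases v with
  | none =>
    show some (min (a : Int) (b : Int)) = some (a : Int)
    exact congrArg some (by omega)
  | some x =>
    show some (min (min x (a : Int)) (b : Int)) = some (min x (a : Int))
    exact congrArg some (by omega)

lemma foldl_minIf_eq_find? (q : Nat → Prop) [DecidablePred q] :
    ∀ (l : List Nat), l.Pairwise (· ≤ ·) → ∀ (v : Option Int),
      l.foldl (fun v s => if q s then omin v s else v) v
        = match l.find? (fun s => decide (q s)) with
          | none => v
          | some s => omin v s := by
  intro l
  induction l with
  | nil => intro _ v; simp
  | cons a l ih =>
    intro hp v
    have ha : ∀ x ∈ l, a ≤ x := fun x hx => (List.pairwise_cons.mp hp).1 x hx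
    have hp' : l.Pairwise (· ≤ ·) := (List.pairwise_cons.mp hp).2
    simp only [List.foldl_cons]
    by_cases hq : q a
    · rw [if_pos hq, List.find?_cons_of_pos (by simp [hq]), ih hp' (omin v a)]
      cases hfind : l.find? (fun s => decide (q s)) with
      | none => rfl
      | some s =>
        have hs : s ∈ l := List.mem_of_find?_eq_some hfind
        exact omin_right_absorb v a s (ha s hs)
    · rw [if_neg hq, List.find?_cons_of_neg (by simp [hq])]
      exact ih hp' v

lemma find?_or_of_pairwise (p q : Nat → Bool) :
    ∀ (l : List Nat), l.Pairwise (· ≤ ·) →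
      l.find? (fun s => p s || q s)
        = match l.find? p, l.find? q with
          | none, r => r
          | some a, none => some a
          | some a, some b => some (min a b) := by
  intro l
  induction l with
  | nil => intro _; simp
  | cons x l ih =>
    intro hp
    have hx : ∀ y ∈ l, x ≤ y := fun y hy => (List.pairwise_cons.mp hp).1 y hy
    have hp' : l.Pairwise (· ≤ ·) := (List.pairwise_cons.mp hp).2
    cases hpx : p x <;> cases hqx : q x
    · rw [List.find?_cons_of_neg (by simp [hpx, hqx]),
        List.find?_cons_of_neg (by simp [hpx]),
        List.find?_cons_of_neg (by simp [hqx])]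
      exact ih hp'
    · rw [List.find?_cons_of_pos (by simp [hpx, hqx]),
        List.find?_cons_of_neg (by simp [hpx]),
        List.find?_cons_of_pos hqx]
      cases hf : l.find? p with
      | none => rfl
      | some a =>
        have : x ≤ a := hx a (List.mem_of_find?_eq_some hf)
        simp [Nat.min_eq_right this]
    · rw [List.find?_cons_of_pos (by simp [hpx, hqx]),
        List.find?_cons_of_pos hpx,
        List.find?_cons_of_neg (by simp [hqx])]
      cases hf : l.find? q with
      | none => rfl
      | some b =>
        have : x ≤ b := hx b (List.mem_of_find?_eq_some hf)
        simp [Nat.min_eq_left this]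
    · rw [List.find?_cons_of_pos (by simp [hpx, hqx]),
        List.find?_cons_of_pos hpx,
        List.find?_cons_of_pos hqx]
      simp

-- merging per-row first-hits row by row = the first hit of the pooled predicate
lemma rowsMerge (c : Nat) (cnd : Nat → Nat → Bool) :
    ∀ (rl : List Nat) (v : Option Int),
      rl.foldl (fun v r =>
          match (List.range c).find? (fun s => cnd r s) with
          | none => v
          | some s => omin v s) v
        = match (List.range c).find? (fun s => rl.any (fun r => cnd r s)) with
          | none => v
          | some s => omin v s := by
  intro rl
  induction rl with
  | nil =>
    intro v
    simp only [List.foldl_nil, List.any_nil]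
    rw [List.find?_eq_none.mpr (fun x _ => by simp)]
  | cons r rl ih =>
    intro v
    simp only [List.foldl_cons, List.any_cons]
    rw [ih, find?_or_of_pairwise _ _ _ (List.pairwise_lt_range.imp Nat.le_of_lt)]
    cases hf1 : (List.range c).find? (fun s => cnd r s) <;>
      cases hf2 : (List.range c).find? (fun s => rl.any (fun r => cnd r s)) <;>
      simp only []
    exact omin_omin v _ _

lemma find?_range_eq_some_of (p : Nat → Bool) (c t : Nat)
    (ht : t < c) (hpt : p t = true) (hlt : ∀ s, s < t → p s = false) :
    (List.range c).find? p = some t := by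
  rw [show c = t + (c - t) by omega, List.range_add, List.find?_append]
  rw [List.find?_eq_none.mpr (fun x hx => by simp [hlt x (List.mem_range.mp hx)])]
  rw [show c - t = (c - t - 1) + 1 by omega, List.range_succ_eq_map]
  simp [hpt]

-- the running-last scan: either no position < n is set, or it returns the greatest set one
lemma lastScan_cases (b : Nat → Bool) (init : Int) :
    ∀ n : Nat,
      ((∀ j, j < n → b j = false) ∧
        (List.range n).foldl (fun last j => if b j then (j : Int) else last) init = init)
      ∨ (∃ g, g < n ∧ b g = true ∧ (∀ j, g < j → j < n → b j = false) ∧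
        (List.range n).foldl (fun last j => if b j then (j : Int) else last) init = (g : Int)) := by
  intro n
  induction n with
  | zero => left; exact ⟨fun j h => absurd h (Nat.not_lt_zero j), by simp⟩
  | succ n ih =>
    rw [List.range_succ, List.foldl_append, List.foldl_cons, List.foldl_nil]
    cases hb : b n
    · rw [if_neg (by simp [hb])]
      rcases ih with ⟨h1, h2⟩ | ⟨g, hg1, hg2, hg3, hg4⟩
      · left
        exact ⟨fun j hj => by rcases Nat.lt_succ_iff_lt_or_eq.mp hj with h | h; exact h1 j h; exact h ▸ hb, h2⟩
      · right
        exact ⟨g, Nat.lt_succ_of_lt hg1, hg2,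
          fun j hj1 hj2 => by rcases Nat.lt_succ_iff_lt_or_eq.mp hj2 with h | h; exact hg3 j hj1 h; exact h ▸ hb, hg4⟩
    · right
      exact ⟨n, Nat.lt_succ_self n, hb, fun j hj1 hj2 => by omega, by rw [if_pos rfl]⟩


-- ---- port-specific lemmas ----

lemma find?_congr_mem (l : List Nat) (p q : Nat → Bool) (h : ∀ x ∈ l, p x = q x) :
    l.find? p = l.find? q := by
  induction l with
  | nil => rfl
  | cons a l ih =>
    have ha := h a (List.mem_cons_self)
    cases hq : q a
    · rw [List.find?_cons_of_neg (by simp [ha, hq]), List.find?_cons_of_neg (by simp [hq])]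
      exact ih (fun x hx => h x (List.mem_cons_of_mem a hx))
    · rw [List.find?_cons_of_pos (by simp [ha, hq]), List.find?_cons_of_pos hq]

-- A's min_shifts_needed value for a column, in closed form:
-- the first shift s whose source position (col - s) mod cols holds a 1 in some row
def msVal (mat : List (List Int)) (c col : Nat) : Option Int :=
  match (List.range c).find? (fun s => oneAt mat (ePos c col s)) with
  | none => none
  | some s => some (s : Int)

lemma msA_inner (mat : List (List Int)) (c row shift : Nat) (ms : List (Option Int)) (k : Nat) :
    ((List.range c).foldl (fun ms (col : Nat) =>
        if PySem.List.pyGetD (PySem.List.pyGetD mat (row : Int) [])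
            (PySem.Int.mod ((col : Int) - (shift : Int) + (c : Int)) (c : Int)) 0 = 1 then
          ms.set col (omin (ms.getD col none) shift)
        else ms) ms).getD k none
      = if k ∈ List.range c ∧ k < ms.length ∧
          PySem.List.pyGetD (PySem.List.pyGetD mat (row : Int) [])
            (PySem.Int.mod ((k : Int) - (shift : Int) + (c : Int)) (c : Int)) 0 = 1
        then omin (ms.getD k none) shift else ms.getD k none :=
  getD_foldl_setIf none _ (fun _ v => omin v shift) (List.range c) ms k List.nodup_range

lemma msA_inner_len (mat : List (List Int)) (c row shift : Nat) (ms : List (Option Int)) :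
    ((List.range c).foldl (fun ms (col : Nat) =>
        if PySem.List.pyGetD (PySem.List.pyGetD mat (row : Int) [])
            (PySem.Int.mod ((col : Int) - (shift : Int) + (c : Int)) (c : Int)) 0 = 1 then
          ms.set col (omin (ms.getD col none) shift)
        else ms) ms).length = ms.length :=
  length_foldl_setIf none _ (fun _ v => omin v shift) (List.range c) ms

lemma msA_shifts (mat : List (List Int)) (c row : Nat) :
    ∀ (sl : List Nat) (ms : List (Option Int)), ms.length = c → ∀ k, k < c →
      ((sl.foldl (fun ms (shift : Nat) =>
          (List.range c).foldl (fun ms (col : Nat) =>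
            if PySem.List.pyGetD (PySem.List.pyGetD mat (row : Int) [])
                (PySem.Int.mod ((col : Int) - (shift : Int) + (c : Int)) (c : Int)) 0 = 1 then
              ms.set col (omin (ms.getD col none) shift)
            else ms) ms) ms).getD k none)
        = sl.foldl (fun v (s : Nat) =>
            if PySem.List.pyGetD (PySem.List.pyGetD mat (row : Int) [])
                (PySem.Int.mod ((k : Int) - (s : Int) + (c : Int)) (c : Int)) 0 = 1 then
              omin v s else v) (ms.getD k none) := by
  intro sl
  induction sl with
  | nil => intro ms _ k _; rfl
  | cons sh sl ih =>
    intro ms hms k hk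
    simp only [List.foldl_cons]
    rw [ih _ (by rw [msA_inner_len, hms]) k hk, msA_inner]
    congr 1
    exact if_congr (by simp [List.mem_range.mpr hk, hms, hk]) rfl rfl

lemma msA_shifts_len (mat : List (List Int)) (c row : Nat) :
    ∀ (sl : List Nat) (ms : List (Option Int)),
      (sl.foldl (fun ms (shift : Nat) =>
          (List.range c).foldl (fun ms (col : Nat) =>
            if PySem.List.pyGetD (PySem.List.pyGetD mat (row : Int) [])
                (PySem.Int.mod ((col : Int) - (shift : Int) + (c : Int)) (c : Int)) 0 = 1 then
              ms.set col (omin (ms.getD col none) shift)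
            else ms) ms) ms).length = ms.length := by
  intro sl
  induction sl with
  | nil => intro ms; rfl
  | cons sh sl ih =>
    intro ms
    simp only [List.foldl_cons]
    rw [ih, msA_inner_len]

lemma msA_rows (mat : List (List Int)) (c : Nat) :
    ∀ (rl : List Nat) (ms : List (Option Int)), ms.length = c → ∀ k, k < c →
      ((rl.foldl (fun ms (row : Nat) =>
          (List.range c).foldl (fun ms (shift : Nat) =>
            (List.range c).foldl (fun ms (col : Nat) =>
              if PySem.List.pyGetD (PySem.List.pyGetD mat (row : Int) [])
                  (PySem.Int.mod ((col : Int) - (shift : Int) + (c : Int)) (c : Int)) 0 = 1 then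
                ms.set col (omin (ms.getD col none) shift)
              else ms) ms) ms) ms).getD k none)
        = rl.foldl (fun v (r : Nat) =>
            match (List.range c).find? (fun (s : Nat) => decide (PySem.List.pyGetD (PySem.List.pyGetD mat (r : Int) [])
                (PySem.Int.mod ((k : Int) - (s : Int) + (c : Int)) (c : Int)) 0 = 1)) with
            | none => v
            | some s => omin v s) (ms.getD k none) := by
  intro rl
  induction rl with
  | nil => intro ms _ k _; rfl
  | cons r rl ih =>
    intro ms hms k hk
    simp only [List.foldl_cons]
    rw [ih _ (by rw [msA_shifts_len, hms]) k hk,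
      msA_shifts mat c r (List.range c) ms hms k hk,
      foldl_minIf_eq_find? _ (List.range c) (List.pairwise_lt_range.imp Nat.le_of_lt) (ms.getD k none)]

lemma msA_getD (mat : List (List Int)) (c : Nat) (k : Nat) (hk : k < c) :
    (((List.range mat.length).foldl (fun ms (row : Nat) =>
        (List.range c).foldl (fun ms (shift : Nat) =>
          (List.range c).foldl (fun ms (col : Nat) =>
            if PySem.List.pyGetD (PySem.List.pyGetD mat (row : Int) [])
                (PySem.Int.mod ((col : Int) - (shift : Int) + (c : Int)) (c : Int)) 0 = 1 then
              ms.set col (omin (ms.getD col none) shift)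
            else ms) ms) ms) (List.replicate c none)).getD k none)
      = msVal mat c k := by
  rw [msA_rows mat c (List.range mat.length) (List.replicate c none) (by simp) k hk]
  have hrepl : (List.replicate c (none : Option Int)).getD k none = none := by
    simp [List.getD_eq_getElem?_getD, hk]
  rw [hrepl, rowsMerge c (fun (r s : Nat) => decide (PySem.List.pyGetD (PySem.List.pyGetD mat (r : Int) [])
      (PySem.Int.mod ((k : Int) - (s : Int) + (c : Int)) (c : Int)) 0 = 1)) (List.range mat.length) none]
  have hpred : ∀ x ∈ List.range c,
      ((List.range mat.length).any (fun r => decide (PySem.List.pyGetD (PySem.List.pyGetD mat (r : Int) [])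
        (PySem.Int.mod ((k : Int) - (x : Int) + (c : Int)) (c : Int)) 0 = 1)))
      = oneAt mat (ePos c k x) := by
    intro x hx
    have hxc : x < c := List.mem_range.mp hx
    have hrw : ∀ r : Nat, PySem.List.pyGetD mat (r : Int) [] = mat.getD r [] := fun r =>
      PySem.List.pyGetD_natCast mat r []
    simp only [epos_mod c k x hk hxc, hrw]
    exact any_range_getD (fun row => decide (PySem.List.pyGetD row ((ePos c k x : Nat) : Int) 0 = 1)) [] mat
  rw [find?_congr_mem _ _ _ hpred]
  cases hf : (List.range c).find? (fun s => oneAt mat (ePos c k s)) with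
  | none => simp [msVal, hf]
  | some s => simp [msVal, hf, omin]

lemma fmsLoop2_cons (mat : List (List Int)) (msc : Option Int) (col r : Nat) (rs : List Nat)
    (cur : Option Int) :
    fmsLoop2 mat msc col (r :: rs) cur
      = (if PySem.List.pyGetD (PySem.List.pyGetD mat (r : Int) []) (col : Int) 0 = 0 ∧ msc = none then
          none
        else if PySem.List.pyGetD (PySem.List.pyGetD mat (r : Int) []) (col : Int) 0 = 1 then
          fmsLoop2 mat msc col rs cur
        else
          fmsLoop2 mat msc col rs
            (match cur, msc with
             | some t, some m => some (t + m)
             | _, _ => none)) := by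
  rfl

lemma loop2_some (mat : List (List Int)) (col : Nat) (m : Int) :
    ∀ (rl : List Nat) (cur : Int),
      fmsLoop2 mat (some m) col rl (some cur)
        = some (some (rl.foldl (fun t (r : Nat) =>
            if PySem.List.pyGetD (PySem.List.pyGetD mat (r : Int) []) (col : Int) 0 = 1 then t
            else t + m) cur)) := by
  intro rl
  induction rl with
  | nil => intro cur; rfl
  | cons r rl ih =>
    intro cur
    rw [fmsLoop2_cons, List.foldl_cons]
    rw [if_neg (by simp)]
    by_cases h : PySem.List.pyGetD (PySem.List.pyGetD mat (r : Int) []) (col : Int) 0 = 1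
    · rw [if_pos h, if_pos h, ih]
    · rw [if_neg h, if_neg h, ih]

lemma loop2_inf (mat : List (List Int)) (col : Nat) :
    ∀ (rl : List Nat),
      fmsLoop2 mat none col rl none = none ∨ fmsLoop2 mat none col rl none = some none := by
  intro rl
  induction rl with
  | nil => right; rfl
  | cons r rl ih =>
    rw [fmsLoop2_cons]
    by_cases h0 : PySem.List.pyGetD (PySem.List.pyGetD mat (r : Int) []) (col : Int) 0 = 0
    · rw [if_pos ⟨h0, rfl⟩]; left; rfl
    · rw [if_neg (fun hc => h0 hc.1)]
      by_cases h1 : PySem.List.pyGetD (PySem.List.pyGetD mat (r : Int) []) (col : Int) 0 = 1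
      · rw [if_pos h1]; exact ih
      · rw [if_neg h1]; exact ih

lemma loop2_noones (mat : List (List Int)) (col : Nat)
    (hmat : mat ≠ []) (h : ∀ row ∈ mat, ¬ (PySem.List.pyGetD row (col : Int) 0 = 1)) :
    fmsLoop2 mat none col (List.range mat.length) (some 0) = none ∨
      fmsLoop2 mat none col (List.range mat.length) (some 0) = some none := by
  obtain ⟨x, l, rfl⟩ := List.exists_cons_of_ne_nil hmat
  rw [List.length_cons, List.range_succ_eq_map, fmsLoop2_cons]
  have hv : PySem.List.pyGetD ((x :: l) : List (List Int)) (((0 : Nat)) : Int) [] = x := by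
    simp
  rw [hv]
  have hx : ¬ (PySem.List.pyGetD x (col : Int) 0 = 1) := h x List.mem_cons_self
  by_cases h0 : PySem.List.pyGetD x (col : Int) 0 = 0
  · rw [if_pos ⟨h0, rfl⟩]; left; rfl
  · rw [if_neg (fun hc => h0 hc.1), if_neg hx]
    exact loop2_inf (x :: l) col _

lemma countFold_eq (col : Nat) (m : Int) :
    ∀ (l : List (List Int)) (t : Int),
      l.foldl (fun t row => if PySem.List.pyGetD row (col : Int) 0 = 1 then t else t + m) t
        = t + m * (l.countP (fun row => !decide (PySem.List.pyGetD row (col : Int) 0 = 1)) : Int) := by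
  intro l
  induction l with
  | nil => intro t; simp
  | cons x l ih =>
    intro t
    simp only [List.foldl_cons, List.countP_cons]
    by_cases h : PySem.List.pyGetD x (col : Int) 0 = 1
    · rw [if_pos h, ih]
      simp only [decide_eq_true h, Bool.not_true, Bool.false_eq_true, if_false, Nat.add_zero]
    · rw [if_neg h, ih]
      simp only [decide_eq_false h, Bool.not_false]
      push_cast
      ring

lemma onesB_inner (c : Nat) (x : List Int) (ones : List Bool) (k : Nat) :
    ((List.range c).foldl (fun ones (j : Nat) =>
        if PySem.List.pyGetD x (j : Int) 0 = 1 then ones.set j true else ones) ones).getD k false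
      = if k ∈ List.range c ∧ k < ones.length ∧ PySem.List.pyGetD x (k : Int) 0 = 1 then true
        else ones.getD k false :=
  getD_foldl_setIf false _ (fun _ _ => true) (List.range c) ones k List.nodup_range

lemma onesB_inner_len (c : Nat) (x : List Int) (ones : List Bool) :
    ((List.range c).foldl (fun ones (j : Nat) =>
        if PySem.List.pyGetD x (j : Int) 0 = 1 then ones.set j true else ones) ones).length
      = ones.length :=
  length_foldl_setIf false _ (fun _ _ => true) (List.range c) ones

lemma onesB_getD (c : Nat) :
    ∀ (ml : List (List Int)) (ones : List Bool), ones.length = c → ∀ k, k < c →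
      ((ml.foldl (fun ones row =>
          (List.range c).foldl (fun ones (j : Nat) =>
            if PySem.List.pyGetD row (j : Int) 0 = 1 then ones.set j true else ones) ones) ones).getD k false)
        = (ones.getD k false || ml.any (fun row => decide (PySem.List.pyGetD row (k : Int) 0 = 1))) := by
  intro ml
  induction ml with
  | nil => intro ones _ k _; simp
  | cons x ml ih =>
    intro ones hlen k hk
    simp only [List.foldl_cons, List.any_cons]
    rw [ih _ (by rw [onesB_inner_len, hlen]) k hk, onesB_inner]
    by_cases h : PySem.List.pyGetD x (k : Int) 0 = 1
    · rw [if_pos ⟨List.mem_range.mpr hk, (by rw [hlen]; exact hk : k < ones.length), h⟩,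
        decide_eq_true h]
      simp
    · rw [if_neg (fun hc => h hc.2.2), decide_eq_false h]
      simp


lemma lastVal_succ (mat : List (List Int)) (init : Int) (n : Nat) :
    lastVal mat init (n + 1) = if oneAt mat n then (n : Int) else lastVal mat init n := by
  simp only [lastVal, List.range_succ, List.foldl_append, List.foldl_cons, List.foldl_nil]

lemma A_eq_canon (mat : List (List Int)) :
    findMinimumShifts mat =
      (match (List.range ((PySem.List.pyGet? mat 0).getD []).length).foldl (fun total (col : Nat) =>
          match fmsLoop2 mat (msVal mat ((PySem.List.pyGet? mat 0).getD []).length col) col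
              (List.range mat.length) (some 0) with
          | none => total
          | some cur =>
            match total, cur with
            | none, cur => cur
            | some t, none => some t
            | some t, some cu => some (min t cu)) none with
       | none => -1
       | some t => t) := by
  simp only [findMinimumShifts]
  congr 1
  refine PySem.List.foldl_congr_mem _ _ _ _ (fun acc x hx => ?_)
  rw [msA_getD mat ((PySem.List.pyGet? mat 0).getD []).length x (List.mem_range.mp hx)]

lemma Bsecond (mat : List (List Int)) (init : Int) :
    ∀ n : Nat,
      (List.range n).foldl (fun (p : Int × Option Int) (j : Nat) =>
        ((if oneAt mat j then (j : Int) else p.1),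
          some (match p.2 with
            | none => ((j : Int) - (if oneAt mat j then (j : Int) else p.1)) *
                (mat.foldl (fun acc row => if PySem.List.pyGetD row (j : Int) 0 = 1 then acc else acc + 1) 0)
            | some b => if ((j : Int) - (if oneAt mat j then (j : Int) else p.1)) *
                  (mat.foldl (fun acc row => if PySem.List.pyGetD row (j : Int) 0 = 1 then acc else acc + 1) 0) < b
                then ((j : Int) - (if oneAt mat j then (j : Int) else p.1)) *
                  (mat.foldl (fun acc row => if PySem.List.pyGetD row (j : Int) 0 = 1 then acc else acc + 1) 0)
                else b)))
        (init, none)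
      = (lastVal mat init n, (List.range n).foldl (stepM (costB mat init)) none) := by
  intro n
  induction n with
  | zero => rfl
  | succ n ih =>
    rw [List.range_succ, List.foldl_append, List.foldl_cons, List.foldl_nil,
      List.foldl_append, List.foldl_cons, List.foldl_nil, ih, lastVal_succ]
    dsimp only
    have hcnt : (mat.foldl (fun acc row =>
        if PySem.List.pyGetD row (n : Int) 0 = 1 then acc else acc + 1) 0) = cntP mat n := by
      rw [countFold_eq n 1 mat 0]
      simp [cntP]
    have hcost : ((n : Int) - (if oneAt mat n then (n : Int) else lastVal mat init n)) *
        (mat.foldl (fun acc row => if PySem.List.pyGetD row (n : Int) 0 = 1 then acc else acc + 1) 0)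
        = costB mat init n := by
      rw [hcnt, costB, lastVal_succ]
    refine congrArg₂ Prod.mk rfl ?_
    cases hm : (List.range n).foldl (stepM (costB mat init)) none with
    | none =>
      simp only [stepM]
      rw [hcost]
    | some b =>
      simp only [stepM]
      rw [hcost]
      rcases lt_or_ge (costB mat init n) b with h | h
      · rw [if_pos h, min_eq_right (le_of_lt h)]
      · rw [if_neg (not_lt.mpr h), min_eq_left h]

lemma B_eq_canon (mat : List (List Int)) :
    findMinimumShifts_alt mat =
      (if lastVal mat (-1) ((PySem.List.pyGet? mat 0).getD []).length = -1 then (-1 : Int)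
       else ((List.range ((PySem.List.pyGet? mat 0).getD []).length).foldl
          (stepM (costB mat (lastVal mat (-1) ((PySem.List.pyGet? mat 0).getD []).length -
            (((PySem.List.pyGet? mat 0).getD []).length : Int)))) none).getD 0) := by
  simp only [findMinimumShifts_alt]
  set c := ((PySem.List.pyGet? mat 0).getD []).length with hc
  set ones := mat.foldl (fun ones row =>
      (List.range c).foldl (fun ones (j : Nat) =>
        if PySem.List.pyGetD row (j : Int) 0 = 1 then ones.set j true else ones) ones)
    (List.replicate c false) with hOnes
  have hones : ∀ j, j < c → ones.getD j false = oneAt mat j := by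
    intro j hj
    rw [hOnes, onesB_getD c mat (List.replicate c false) (by simp) j hj]
    have hrepl : (List.replicate c (false : Bool)).getD j false = false := by
      simp [List.getD_eq_getElem?_getD, hj]
    rw [hrepl, Bool.false_or]
    rfl
  have h1 : (List.range c).foldl
      (fun last (j : Nat) => if ones.getD j false then (j : Int) else last) (-1)
      = lastVal mat (-1) c :=
    PySem.List.foldl_congr_mem _ _ _ _ (fun acc x hx => by rw [hones x (List.mem_range.mp hx)])
  rw [h1]
  have h2 : (List.range c).foldl (fun (p : Int × Option Int) (j : Nat) =>
      ((if ones.getD j false then (j : Int) else p.1),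
        some (match p.2 with
          | none => ((j : Int) - (if ones.getD j false then (j : Int) else p.1)) *
              (mat.foldl (fun acc row => if PySem.List.pyGetD row (j : Int) 0 = 1 then acc else acc + 1) 0)
          | some b => if ((j : Int) - (if ones.getD j false then (j : Int) else p.1)) *
                (mat.foldl (fun acc row => if PySem.List.pyGetD row (j : Int) 0 = 1 then acc else acc + 1) 0) < b
              then ((j : Int) - (if ones.getD j false then (j : Int) else p.1)) *
                (mat.foldl (fun acc row => if PySem.List.pyGetD row (j : Int) 0 = 1 then acc else acc + 1) 0)
              else b)))
      (lastVal mat (-1) c - (c : Int), none)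
    = (List.range c).foldl (fun (p : Int × Option Int) (j : Nat) =>
        ((if oneAt mat j then (j : Int) else p.1),
          some (match p.2 with
            | none => ((j : Int) - (if oneAt mat j then (j : Int) else p.1)) *
                (mat.foldl (fun acc row => if PySem.List.pyGetD row (j : Int) 0 = 1 then acc else acc + 1) 0)
            | some b => if ((j : Int) - (if oneAt mat j then (j : Int) else p.1)) *
                  (mat.foldl (fun acc row => if PySem.List.pyGetD row (j : Int) 0 = 1 then acc else acc + 1) 0) < b
                then ((j : Int) - (if oneAt mat j then (j : Int) else p.1)) *
                  (mat.foldl (fun acc row => if PySem.List.pyGetD row (j : Int) 0 = 1 then acc else acc + 1) 0)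
                else b)))
        (lastVal mat (-1) c - (c : Int), none) :=
    PySem.List.foldl_congr_mem _ _ _ _ (fun acc x hx => by rw [hones x (List.mem_range.mp hx)])
  rw [h2, Bsecond mat (lastVal mat (-1) c - (c : Int)) c]

lemma K2 (mat : List (List Int)) (c g col : Nat) (hcol : col < c) (hg : g < c)
    (hone : oneAt mat g = true) (hmax : ∀ j, g < j → j < c → oneAt mat j = false) :
    msVal mat c col = some ((col : Int) - lastVal mat ((g : Int) - (c : Int)) (col + 1)) := by
  rcases lastScan_cases (oneAt mat) ((g : Int) - (c : Int)) (col + 1) with ⟨hno, hl⟩ | ⟨g1, hg11, hg12, hg13, hl⟩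
  · have hl' : lastVal mat ((g : Int) - (c : Int)) (col + 1) = (g : Int) - (c : Int) := hl
    have hcolg : col < g := by
      by_contra h
      have h2 := hno g (by omega)
      rw [hone] at h2
      simp at h2
    have hfind : (List.range c).find? (fun s => oneAt mat (ePos c col s)) = some (col + c - g) :=
      find?_range_eq_some_of _ c (col + c - g) (by omega)
        (by
          simp only [ePos]
          rw [if_neg (by omega), show col + c - (col + c - g) = g by omega]
          exact hone)
        (fun s hs => by
          by_cases hsc : s ≤ col
          · simp only [ePos]
            rw [if_pos hsc]
            exact hno (col - s) (by omega)
          · simp only [ePos]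
            rw [if_neg hsc]
            exact hmax (col + c - s) (by omega) (by omega))
    rw [msVal, hfind, hl']
    dsimp only
    congr 1
    omega
  · have hl' : lastVal mat ((g : Int) - (c : Int)) (col + 1) = (g1 : Int) := hl
    have hg1col : g1 ≤ col := by omega
    have hfind : (List.range c).find? (fun s => oneAt mat (ePos c col s)) = some (col - g1) :=
      find?_range_eq_some_of _ c (col - g1) (by omega)
        (by
          simp only [ePos]
          rw [if_pos (by omega), show col - (col - g1) = g1 by omega]
          exact hg12)
        (fun s hs => by
          simp only [ePos]
          rw [if_pos (by omega)]
          exact hg13 (col - s) (by omega) (by omega))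
    rw [msVal, hfind, hl']
    dsimp only
    congr 1
    omega

lemma foldA_none (f : Nat → Option (Option Int)) :
    ∀ (l : List Nat), (∀ x ∈ l, f x = none ∨ f x = some none) →
      l.foldl (fun total (col : Nat) =>
        match f col with
        | none => total
        | some cur =>
          match total, cur with
          | none, cur => cur
          | some t, none => some t
          | some t, some cu => some (min t cu)) none = none := by
  intro l
  induction l with
  | nil => intro _; rfl
  | cons a l ih =>
    intro h
    simp only [List.foldl_cons]
    rcases h a List.mem_cons_self with ha | ha <;> rw [ha] <;>
      exact ih (fun x hx => h x (List.mem_cons_of_mem a hx))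

lemma stepM_foldl_isSome_of_some (f : Nat → Int) :
    ∀ (l : List Nat) (x : Int), ((l.foldl (stepM f) (some x)).isSome) := by
  intro l
  induction l with
  | nil => intro x; rfl
  | cons a l ih =>
    intro x
    rw [List.foldl_cons, show stepM f (some x) a = some (min x (f a)) from rfl]
    exact ih _

lemma stepM_foldl_ne_none (f : Nat → Int) (l : List Nat) (hl : l ≠ []) :
    ((l.foldl (stepM f) none).isSome) := by
  cases l with
  | nil => exact absurd rfl hl
  | cons a l =>
    rw [List.foldl_cons, show stepM f none a = some (f a) from rfl]
    exact stepM_foldl_isSome_of_some f l _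

-- ===== VERDICT (by name: the statement is the Claim_ definition above) =====
theorem findMinimumShifts_spec : Claim_equal_findMinimumShifts := by
  intro mat _ hpre
  unfold Spec_findMinimumShifts
  rw [A_eq_canon, B_eq_canon]
  rcases lastScan_cases (oneAt mat) (-1) ((PySem.List.pyGet? mat 0).getD []).length with
    ⟨hno, hlast⟩ | ⟨g, hg1, hg2, hg3, hlast⟩
  · have hl' : lastVal mat (-1) ((PySem.List.pyGet? mat 0).getD []).length = -1 := hlast
    rw [hl', if_pos rfl]
    have hf : ∀ x ∈ List.range ((PySem.List.pyGet? mat 0).getD []).length,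
        fmsLoop2 mat (msVal mat ((PySem.List.pyGet? mat 0).getD []).length x) x
          (List.range mat.length) (some 0) = none ∨
        fmsLoop2 mat (msVal mat ((PySem.List.pyGet? mat 0).getD []).length x) x
          (List.range mat.length) (some 0) = some none := by
      intro x hx
      have hxc := List.mem_range.mp hx
      have hms : msVal mat ((PySem.List.pyGet? mat 0).getD []).length x = none := by
        rw [msVal, List.find?_eq_none.mpr]
        intro s hs
        rw [hno (ePos ((PySem.List.pyGet? mat 0).getD []).length x s)
          (epos_lt _ _ _ hxc (List.mem_range.mp hs))]
        simp
      rw [hms]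
      exact loop2_noones mat x hpre.1 (fun row hrow => by
        have := hno x hxc
        rw [oneAt] at this
        have h2 := List.any_eq_false.mp this row hrow
        simpa using h2)
    have h0 := foldA_none (fun col => fmsLoop2 mat
      (msVal mat ((PySem.List.pyGet? mat 0).getD []).length col) col
      (List.range mat.length) (some 0)) (List.range ((PySem.List.pyGet? mat 0).getD []).length) hf
    rw [h0]
  · have hl' : lastVal mat (-1) ((PySem.List.pyGet? mat 0).getD []).length = (g : Int) := hlast
    rw [hl', if_neg (by have := Int.natCast_nonneg g; omega)]
    have hstep : ∀ (acc : Option Int) (x : Nat),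
        x ∈ List.range ((PySem.List.pyGet? mat 0).getD []).length →
        (match fmsLoop2 mat (msVal mat ((PySem.List.pyGet? mat 0).getD []).length x) x
            (List.range mat.length) (some 0) with
         | none => acc
         | some cur =>
           match acc, cur with
           | none, cur => cur
           | some t, none => some t
           | some t, some cu => some (min t cu))
        = stepM (costB mat ((g : Int) - (((PySem.List.pyGet? mat 0).getD []).length : Int))) acc x := by
      intro acc x hx
      have hxc := List.mem_range.mp hx
      rw [K2 mat ((PySem.List.pyGet? mat 0).getD []).length g x hxc hg1 hg2 hg3,
        loop2_some mat x _ (List.range mat.length) 0]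
      have hrw : ∀ r : Nat, PySem.List.pyGetD mat (r : Int) [] = mat.getD r [] := fun r =>
        PySem.List.pyGetD_natCast mat r []
      have hfold : (List.range mat.length).foldl (fun t (r : Nat) =>
          if PySem.List.pyGetD (PySem.List.pyGetD mat (r : Int) []) (x : Int) 0 = 1 then t
          else t + ((x : Int) - lastVal mat ((g : Int) - (((PySem.List.pyGet? mat 0).getD []).length : Int)) (x + 1))) 0
          = costB mat ((g : Int) - (((PySem.List.pyGet? mat 0).getD []).length : Int)) x := by
        simp only [hrw]
        rw [foldl_range_getD (fun t row =>
          if PySem.List.pyGetD row (x : Int) 0 = 1 then t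
          else t + ((x : Int) - lastVal mat ((g : Int) - (((PySem.List.pyGet? mat 0).getD []).length : Int)) (x + 1))) [] mat 0]
        rw [countFold_eq x _ mat 0]
        simp only [zero_add]
        rfl
      rw [hfold]
      cases acc <;> rfl
    rw [PySem.List.foldl_congr_mem _ _ _ _ hstep]
    have hne : List.range ((PySem.List.pyGet? mat 0).getD []).length ≠ [] := by
      simp only [ne_eq, List.range_eq_nil]
      omega
    obtain ⟨T, hT⟩ := Option.isSome_iff_exists.mp (stepM_foldl_ne_none _ _ hne)
    rw [hT]
    rfl
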